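-- pv_equiv track=rewrite | github.com/ChanHyukLeee/Study-and-practice | 21.09.02.py | find_dice_probabilities
-- ===== SOURCE A (Python) =====
-- import collections
--
-- def find_dice_probabilities(S, n_faces=6):
--     if (S>2*n_faces or S<2):
--         return None
--     cdict = collections.Counter()
--     ddict = collections.defaultdict(list)
--     for dice1 in range(1, n_faces+1):
--         for dice2 in range(1, n_faces+1):
--             t = [dice1, dice2]
--             cdict[dice1 + dice2] += 1
--             ddict[dice1 + dice2].append(t)
--     return ddict[S]
-- ===== SOURCE B (Python) =====
-- def find_dice_probabilities(S, n_faces=6):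
--     # O(n): for each dice1 compute the unique matching dice2 = S - dice1.
--     if S > 2 * n_faces or S < 2:
--         return None
--     return [[d1, S - d1] for d1 in range(1, n_faces + 1) if 1 <= S - d1 <= n_faces]
-- ===== Notes on version B (the rewrite author's own statement) =====
-- stated objective: faster
-- what changed: Instead of enumerating all n^2 ordered dice pairs into a Counter and a defaultdict and then looking up S, B iterates dice1 once and computes the unique dice2 = S - dice1, keeping it when it is in range.
import Mathlib
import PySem

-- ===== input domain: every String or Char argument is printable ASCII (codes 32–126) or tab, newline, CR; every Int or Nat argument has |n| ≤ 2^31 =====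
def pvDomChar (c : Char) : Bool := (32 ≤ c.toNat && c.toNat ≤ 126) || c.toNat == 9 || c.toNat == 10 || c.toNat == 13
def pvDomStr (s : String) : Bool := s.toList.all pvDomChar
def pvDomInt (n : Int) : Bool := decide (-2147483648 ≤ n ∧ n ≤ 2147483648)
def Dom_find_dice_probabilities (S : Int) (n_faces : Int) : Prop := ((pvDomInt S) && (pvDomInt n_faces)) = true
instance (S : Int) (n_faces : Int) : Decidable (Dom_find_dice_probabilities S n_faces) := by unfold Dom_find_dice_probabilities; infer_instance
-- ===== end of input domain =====

-- B replaces A's O(n^2) enumeration of all dice pairs with a single O(n) pass computing dice2 = S - dice1.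

-- ===== PORT A =====
-- loop body of A's inner 'for dice2' loop: update the Counter and the defaultdict(list)
def pvStepA (dice1 : Int) (p : PySem.Dict Int Int × PySem.Dict Int (List (List Int))) (dice2 : Int) :
    PySem.Dict Int Int × PySem.Dict Int (List (List Int)) :=
  let t : List Int := [dice1, dice2]
  (p.1.modify (dice1 + dice2) 0 (· + 1),
   p.2.insert (dice1 + dice2) (p.2.getD (dice1 + dice2) [] ++ [t]))

-- A's outer 'for dice1' loop body: the whole inner loop
def pvOuterA (n_faces : Int) (p : PySem.Dict Int Int × PySem.Dict Int (List (List Int))) (dice1 : Int) :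
    PySem.Dict Int Int × PySem.Dict Int (List (List Int)) :=
  (PySem.List.pyRange 1 (n_faces + 1) 1).foldl (pvStepA dice1) p

def find_dice_probabilities (S : Int) (n_faces : Int) : Option (List (List Int)) :=
  if S > 2 * n_faces ∨ S < 2 then none
  else
    let st := (PySem.List.pyRange 1 (n_faces + 1) 1).foldl (pvOuterA n_faces)
      (PySem.Dict.empty, PySem.Dict.empty)
    some (st.2.getD S [])

-- ===== PORT B =====
def find_dice_probabilities_alt (S : Int) (n_faces : Int) : Option (List (List Int)) :=
  if S > 2 * n_faces ∨ S < 2 then none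
  else some (((PySem.List.pyRange 1 (n_faces + 1) 1).filter
      (fun d1 => decide (1 ≤ S - d1 ∧ S - d1 ≤ n_faces))).map (fun d1 => [d1, S - d1]))

-- ===== PRECONDITION & SPEC =====
def Spec_find_dice_probabilities (S : Int) (n_faces : Int) (out : Option (List (List Int))) : Prop := out = find_dice_probabilities_alt S n_faces
instance (S : Int) (n_faces : Int) (out : Option (List (List Int))) : Decidable (Spec_find_dice_probabilities S n_faces out) := by unfold Spec_find_dice_probabilities; infer_instance

-- ===== CLAIM (what is proved, stated in full; the proofs are below) =====
def Claim_equal_find_dice_probabilities : Prop := ∀ (S : Int) (n_faces : Int), Dom_find_dice_probabilities S n_faces → Spec_find_dice_probabilities S n_faces (find_dice_probabilities S n_faces)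

-- ===== LEMMAS AND PROOFS =====

-- the inner loop appends, at key S, one entry [d1, d2] for every d2 in the list with d1 + d2 = S
lemma pvInner_getD (S d1 : Int) (l : List Int)
    (p : PySem.Dict Int Int × PySem.Dict Int (List (List Int))) :
    ((l.foldl (pvStepA d1) p).2).getD S []
      = p.2.getD S [] ++ (l.filter (fun d2 => decide (d1 + d2 = S))).map (fun d2 => [d1, d2]) := by
  induction l generalizing p with
  | nil => simp
  | cons a l ih =>
    simp only [List.foldl_cons, List.filter_cons, ih]
    by_cases h : d1 + a = S
    · simp [pvStepA, h]
    · have hne : S ≠ d1 + a := fun hs => h hs.symm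
      simp [pvStepA, PySem.Dict.getD_insert, h, hne]

-- the outer loop: the defaultdict's entry at S collects those pairs for every d1 processed
lemma pvOuter_getD (S n_faces : Int) (L : List Int)
    (p : PySem.Dict Int Int × PySem.Dict Int (List (List Int))) :
    ((L.foldl (pvOuterA n_faces) p).2).getD S []
      = p.2.getD S [] ++ L.flatMap (fun d1 =>
          ((PySem.List.pyRange 1 (n_faces + 1) 1).filter (fun d2 => decide (d1 + d2 = S))).map
            (fun d2 => [d1, d2])) := by
  induction L generalizing p with
  | nil => simp
  | cons a L ih =>
    simp only [List.foldl_cons, List.flatMap_cons, ih, pvOuterA, pvInner_getD, List.append_assoc]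

-- filtering a unit-step range by 'd1 + x = S' keeps at most the single value S - d1
lemma pvFilter_range (a b d1 S : Int) :
    (PySem.List.pyRange a b 1).filter (fun x => decide (d1 + x = S))
      = if a ≤ S - d1 ∧ S - d1 < b then [S - d1] else [] := by
  induction h : (b - a).toNat generalizing a with
  | zero =>
    rw [PySem.List.pyRange_one_eq_nil (by omega)]
    simp only [List.filter_nil]
    rw [if_neg (by omega)]
  | succ k ih =>
    rw [PySem.List.pyRange_one_cons (by omega), List.filter_cons]
    by_cases hc : d1 + a = S
    · rw [if_pos (by simpa using hc), ih (a + 1) (by omega), if_neg (by omega), if_pos (by omega)]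
      congr 1
      omega
    · rw [if_neg (by simpa using hc), ih (a + 1) (by omega)]
      by_cases h1 : a + 1 ≤ S - d1 ∧ S - d1 < b
      · rw [if_pos h1, if_pos (by omega)]
      · rw [if_neg h1, if_neg (by omega)]

-- flatMap of per-element "singleton or nothing" is filter-then-map
lemma pvFlatMap_filter (S n_faces : Int) (L : List Int) :
    (L.flatMap (fun d1 => if 1 ≤ S - d1 ∧ S - d1 < n_faces + 1 then [[d1, S - d1]] else []))
      = (L.filter (fun d1 => decide (1 ≤ S - d1 ∧ S - d1 ≤ n_faces))).map (fun d1 => [d1, S - d1]) := by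
  induction L with
  | nil => rfl
  | cons a L ih =>
    by_cases h : 1 ≤ S - a ∧ S - a ≤ n_faces
    · rw [List.flatMap_cons, List.filter_cons_of_pos (by simpa using h), if_pos (by omega), ih]
      rfl
    · rw [List.flatMap_cons, List.filter_cons_of_neg (by simpa using h), if_neg (by omega), ih]
      rfl

-- ===== VERDICT (by name: the statement is the Claim_ definition above) =====
theorem find_dice_probabilities_spec : Claim_equal_find_dice_probabilities := by
  intro S n _
  unfold Spec_find_dice_probabilities find_dice_probabilities find_dice_probabilities_alt
  by_cases hg : S > 2 * n ∨ S < 2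
  · rw [if_pos hg, if_pos hg]
  · simp only [hg, if_false]
    rw [pvOuter_getD, PySem.Dict.getD_empty, List.nil_append]
    congr 1
    have : ∀ d1 : Int,
        ((PySem.List.pyRange 1 (n + 1) 1).filter (fun d2 => decide (d1 + d2 = S))).map
          (fun d2 => [d1, d2])
        = if 1 ≤ S - d1 ∧ S - d1 < n + 1 then [[d1, S - d1]] else [] := by
      intro d1
      rw [pvFilter_range]
      split_ifs <;> simp
    simp only [this]
    exact pvFlatMap_filter S n _
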